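-- pv_equiv track=rewrite | github.com/yenhao123/zsim_ramulator | zsim-ramulator/shell/canny/tools/reformat_to_dramsys_form.py | convert_to_dramsysformat_replay
-- ===== SOURCE A (Python) =====
-- BASE_ADDR = 536870912
--
-- N_REPLAY = 100
--
-- def convert_to_dramsysformat_replay(data_group, n_groups):
--     operation_map = {
--         "L" : "read",
--         "S" : "write",
--     }
--
--     new_data_group = []
--     for i in range(n_groups):
--         new_items = []
--         prev_addr = 0
--         for j, line in enumerate(data_group[i]):
--             parts = line.split()
--             operation = operation_map[parts[3]]
--             ori_addr = int(parts[4])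
--             offset = ori_addr - prev_addr
--             prev_addr = ori_addr
--             if j == 0:
--                 continue
--             if abs(offset) > BASE_ADDR:
--                 addr = hex(BASE_ADDR * 2)
--             else:
--                 addr = hex(BASE_ADDR + offset)
--
--             new_items.append((operation, addr))
--
--         new_items_replay = []
--         for _ in range(N_REPLAY):
--             new_items_replay += new_items
--
--         new_lines = []
--         for j, item in enumerate(new_items_replay):
--             operation, addr = item
--             new_line = "{}:\t{}\t{}\n".format(j, operation, addr)
--             new_lines.append(new_line)
--
--         new_data_group.append(new_lines)
--
--     return new_data_group
-- ===== SOURCE B (Python) =====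
-- BASE_ADDR = 536870912
--
-- N_REPLAY = 100
--
--
-- def convert_to_dramsysformat_replay(data_group, n_groups):
--     op_of = {"L": "read", "S": "write"}
--     result = []
--     for i in range(n_groups):
--         group = data_group[i]
--         ops = [op_of[line.split()[3]] for line in group]
--         addrs = [int(line.split()[4]) for line in group]
--         # offsets come from consecutive address pairs; the first line only seeds
--         # the previous address, so pair ops[1:] with (addrs, addrs[1:])
--         items = [(op,
--                   hex(2 * BASE_ADDR) if abs(cur - prev) > BASE_ADDR
--                   else hex(BASE_ADDR + (cur - prev)))
--                  for op, prev, cur in zip(ops[1:], addrs, addrs[1:])]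
--         n = len(items)
--         # one pass over the replicated index space instead of materialising
--         # the 100x intermediate list: replicated position j holds items[j % n]
--         result.append(["{}:\t{}\t{}\n".format(j, *items[j % n])
--                        for j in range(n * N_REPLAY)])
--     return result
-- ===== Notes on version B (the rewrite author's own statement) =====
-- stated objective: alternative
-- what changed: Replaces the stateful enumerate/skip parsing loop by parsing ops and addresses into separate lists and zipping consecutive address pairs, and replaces the 100x list-concatenation plus separate formatting loop by a single comprehension over range(n*N_REPLAY) that fetches items[j % n], never materialising the replicated intermediate list; it trades A's explicit accumulator state for zips and modular indexing at the same asymptotic cost.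
import Mathlib
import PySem

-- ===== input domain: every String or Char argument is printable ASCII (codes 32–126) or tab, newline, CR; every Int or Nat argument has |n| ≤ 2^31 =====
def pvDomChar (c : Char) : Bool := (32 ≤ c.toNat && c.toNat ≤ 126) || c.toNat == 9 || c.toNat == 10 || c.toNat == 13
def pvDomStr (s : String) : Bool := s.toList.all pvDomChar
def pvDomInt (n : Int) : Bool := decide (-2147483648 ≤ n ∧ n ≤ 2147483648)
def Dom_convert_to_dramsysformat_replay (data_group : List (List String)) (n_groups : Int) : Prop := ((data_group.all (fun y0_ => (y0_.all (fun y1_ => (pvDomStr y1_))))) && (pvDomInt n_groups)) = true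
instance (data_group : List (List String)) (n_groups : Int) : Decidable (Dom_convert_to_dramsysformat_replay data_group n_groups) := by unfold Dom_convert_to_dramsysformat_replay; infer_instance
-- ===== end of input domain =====

-- B replaces A's stateful enumerate/skip parsing loop by zipping consecutive address
-- pairs, and fuses the 100x replication list and the formatting loop into one pass
-- over range(n*N_REPLAY) using items[j % n] (objective: alternative decomposition,
-- same asymptotic cost).

-- ===== PORT A =====
-- module constants and shared primitive ports (hex(), the operation map, the
-- parts[3]/parts[4] parsing and the clamp expression appear verbatim in both
-- Python versions, so both ports use these helpers)
def BASE_ADDR : Int := 536870912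
def N_REPLAY : Int := 100

-- exact port of Python's hex() on the Ints this program feeds it (here always ≥ 0;
-- the negative branch mirrors Python's "-0x…" form)
def pyHex (n : Int) : String :=
  if n < 0 then "-0x" ++ String.ofList (Nat.toDigits 16 (-n).toNat)
  else "0x" ++ String.ofList (Nat.toDigits 16 n.toNat)

def operation_map : PySem.Dict String String :=
  PySem.Dict.ofList [("L", "read"), ("S", "write")]

-- operation_map[line.split()[3]]  (default "" is unreachable under Pre_)
def parseOp (line : String) : String :=
  (operation_map.get? ((PySem.List.pyGet? (PySem.Str.split₀ line) 3).getD "")).getD ""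

-- int(line.split()[4])  (default 0 is unreachable under Pre_)
def parseAddr (line : String) : Int :=
  (PySem.Int.ofStr? ((PySem.List.pyGet? (PySem.Str.split₀ line) 4).getD "")).getD 0

-- hex(BASE_ADDR*2) if abs(offset) > BASE_ADDR else hex(BASE_ADDR + offset)
def clampAddr (offset : Int) : String :=
  if (if offset < 0 then -offset else offset) > BASE_ADDR then pyHex (BASE_ADDR * 2)
  else pyHex (BASE_ADDR + offset)

def convert_to_dramsysformat_replay (data_group : List (List String)) (n_groups : Int) : List (List String) :=
  (PySem.List.pyRange 0 n_groups 1).foldl (fun new_data_group i =>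
    let group := (PySem.List.pyGet? data_group i).getD []
    let st := (PySem.List.enumerate group 0).foldl
      (fun (st : List (String × String) × Int) jl =>
        let operation := parseOp jl.2
        let ori_addr := parseAddr jl.2
        let offset := ori_addr - st.2
        if jl.1 = 0 then (st.1, ori_addr)
        else (st.1 ++ [(operation, clampAddr offset)], ori_addr)) ([], 0)
    let new_items := st.1
    let new_items_replay := (PySem.List.pyRange 0 N_REPLAY 1).foldl
      (fun acc _ => acc ++ new_items) ([] : List (String × String))
    let new_lines := (PySem.List.enumerate new_items_replay 0).foldl
      (fun lines jit =>
        lines ++ [PySem.Int.toStr jit.1 ++ ":\t" ++ jit.2.1 ++ "\t" ++ jit.2.2 ++ "\n"])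
      ([] : List String)
    new_data_group ++ [new_lines]) []

-- ===== PORT B =====
def convert_to_dramsysformat_replay_alt (data_group : List (List String)) (n_groups : Int) : List (List String) :=
  (PySem.List.pyRange 0 n_groups 1).foldl (fun result i =>
    let group := (PySem.List.pyGet? data_group i).getD []
    let ops := group.map parseOp
    let addrs := group.map parseAddr
    let items := ((ops.drop 1).zip (addrs.zip (addrs.drop 1))).map
      (fun t => (t.1, clampAddr (t.2.2 - t.2.1)))
    let n : Int := items.length
    result ++ [(PySem.List.pyRange 0 (n * N_REPLAY) 1).map (fun j =>
      let it := (PySem.List.pyGet? items (PySem.Int.mod j n)).getD ("", "")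
      PySem.Int.toStr j ++ ":\t" ++ it.1 ++ "\t" ++ it.2 ++ "\n")]) []

-- ===== PRECONDITION & SPEC =====
-- line has ≥5 whitespace-separated fields, field 3 is "L"/"S", field 4 parses as int
def lineOK (line : String) : Bool :=
  match PySem.List.pyGet? (PySem.Str.split₀ line) 3, PySem.List.pyGet? (PySem.Str.split₀ line) 4 with
  | some op, some a => (op == "L" || op == "S") && (PySem.Int.ofStr? a).isSome
  | _, _ => false

-- exactly the inputs on which Python A returns: every requested group exists and
-- every line of a requested group parses (otherwise A raises Index/Key/ValueError)
def Pre_convert_to_dramsysformat_replay (data_group : List (List String)) (n_groups : Int) : Prop :=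
  n_groups ≤ (data_group.length : Int) ∧
  ((data_group.take n_groups.toNat).all (fun g => g.all lineOK)) = true
instance (data_group : List (List String)) (n_groups : Int) : Decidable (Pre_convert_to_dramsysformat_replay data_group n_groups) := by unfold Pre_convert_to_dramsysformat_replay; infer_instance

def pvWitness_convert_to_dramsysformat_replay : List (List String) × Int :=
  ([["a b c L 5", "a b c S 7", "x y z L 3"]], 1)

def Spec_convert_to_dramsysformat_replay (data_group : List (List String)) (n_groups : Int) (out : List (List String)) : Prop := out = convert_to_dramsysformat_replay_alt data_group n_groups
instance (data_group : List (List String)) (n_groups : Int) (out : List (List String)) : Decidable (Spec_convert_to_dramsysformat_replay data_group n_groups out) := by unfold Spec_convert_to_dramsysformat_replay; infer_instance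

-- ===== CLAIM (what is proved, stated in full; the proofs are below) =====
def Claim_equal_convert_to_dramsysformat_replay : Prop := ∀ (data_group : List (List String)) (n_groups : Int), Dom_convert_to_dramsysformat_replay data_group n_groups → Pre_convert_to_dramsysformat_replay data_group n_groups → Spec_convert_to_dramsysformat_replay data_group n_groups (convert_to_dramsysformat_replay data_group n_groups)

-- ===== LEMMAS AND PROOFS =====

-- the common intermediate value: the (operation, addr) items of one group
def pvF : Int → List String → List (String × String)
  | _, [] => []
  | prev, l :: ls => (parseOp l, clampAddr (parseAddr l - prev)) :: pvF (parseAddr l) ls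

def pvItems : List String → List (String × String)
  | [] => []
  | x :: rest => pvF (parseAddr x) rest

-- A's inner fold (past index 0) appends exactly pvF
theorem foldA_eq (ls : List String) : ∀ (s : Int), 1 ≤ s → ∀ (acc : List (String × String)) (prev : Int),
    ((PySem.List.enumerate ls s).foldl
      (fun (st : List (String × String) × Int) jl =>
        if jl.1 = 0 then (st.1, parseAddr jl.2)
        else (st.1 ++ [(parseOp jl.2, clampAddr (parseAddr jl.2 - st.2))], parseAddr jl.2)) (acc, prev)).1
    = acc ++ pvF prev ls := by
  induction ls with
  | nil => intro s hs acc prev; simp [PySem.List.enumerate_nil, pvF]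
  | cons y ys ih =>
    intro s hs acc prev
    rw [PySem.List.enumerate_cons]
    simp only [List.foldl_cons]
    have hs0 : ¬ (s = 0) := by omega
    simp only [hs0, if_false]
    rw [ih (s + 1) (by omega)]
    simp [pvF, List.append_assoc]

theorem itemsA_eq (group : List String) :
    ((PySem.List.enumerate group 0).foldl
      (fun (st : List (String × String) × Int) jl =>
        if jl.1 = 0 then (st.1, parseAddr jl.2)
        else (st.1 ++ [(parseOp jl.2, clampAddr (parseAddr jl.2 - st.2))], parseAddr jl.2)) ([], 0)).1
    = pvItems group := by
  cases group with
  | nil => simp [PySem.List.enumerate_nil, pvItems]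
  | cons x rest =>
    rw [PySem.List.enumerate_cons]
    simp only [List.foldl_cons]
    norm_num
    rw [foldA_eq rest 1 (by omega)]
    simp [pvItems]

theorem zipB_aux (rest : List String) : ∀ (prev : Int),
    ((rest.map parseOp).zip ((prev :: rest.map parseAddr).zip (rest.map parseAddr))).map
      (fun t => (t.1, clampAddr (t.2.2 - t.2.1)))
    = pvF prev rest := by
  induction rest with
  | nil => intro prev; simp [pvF]
  | cons y ys ih => intro prev; simp [pvF, ih (parseAddr y)]

theorem itemsB_eq (group : List String) :
    (((group.map parseOp).drop 1).zip ((group.map parseAddr).zip ((group.map parseAddr).drop 1))).map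
      (fun t => (t.1, clampAddr (t.2.2 - t.2.1)))
    = pvItems group := by
  cases group with
  | nil => simp [pvItems]
  | cons x rest => simpa [pvItems] using zipB_aux rest (parseAddr x)

-- A's replication fold is flatten of replicate
theorem replayA_eq (xs : List (String × String)) (k : Nat) :
    ∀ (init : List (String × String)),
    (PySem.List.pyRange 0 (k : Int) 1).foldl (fun acc _ => acc ++ xs) init
    = init ++ (List.replicate k xs).flatten := by
  induction k with
  | zero => intro init; simp [PySem.List.pyRange_one_eq_nil]
  | succ m ih =>
    intro init
    rw [show ((m + 1 : Nat) : Int) = (m : Int) + 1 by push_cast; ring,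
        PySem.List.pyRange_one_succ_right (by positivity), List.foldl_append, ih]
    simp [List.replicate_succ' (n := m)]

-- the replicated-and-enumerated list is the modular-index map over the range
theorem enum_flatten_eq {α : Type} (xs : List α) (hxs : xs ≠ []) (d : α) (k : Nat) :
    ∀ (q : Nat),
    PySem.List.enumerate ((List.replicate k xs).flatten) ((q * xs.length : Nat) : Int)
    = (PySem.List.pyRange ((q * xs.length : Nat) : Int) (((q + k) * xs.length : Nat) : Int) 1).map
        (fun j => (j, (PySem.List.pyGet? xs (PySem.Int.mod j (xs.length : Int))).getD d)) := by
  induction k with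
  | zero =>
    intro q
    rw [PySem.List.pyRange_one_eq_nil (by simp)]
    simp [PySem.List.enumerate_nil]
  | succ m ih =>
    intro q
    have hlen : 0 < xs.length := List.length_pos_iff.mpr hxs
    rw [List.replicate_succ, List.flatten_cons, PySem.List.enumerate_append]
    have hsplit : PySem.List.pyRange ((q * xs.length : Nat) : Int) (((q + (m + 1)) * xs.length : Nat) : Int) 1
        = PySem.List.pyRange ((q * xs.length : Nat) : Int) (((q + 1) * xs.length : Nat) : Int) 1
          ++ PySem.List.pyRange (((q + 1) * xs.length : Nat) : Int) ((((q + 1) + m) * xs.length : Nat) : Int) 1 := by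
      rw [show ((q + (m + 1)) * xs.length : Nat) = (((q + 1) + m) * xs.length : Nat) by ring]
      exact PySem.List.pyRange_one_append _ _ _
        (by exact_mod_cast Nat.mul_le_mul_right _ (by omega))
        (by exact_mod_cast Nat.mul_le_mul_right _ (by omega))
    rw [hsplit, List.map_append]
    congr 1
    · -- one fresh copy of xs
      have hstep : ((q + 1) * xs.length : Nat) = q * xs.length + xs.length := by ring
      apply List.ext_getElem
      · simp only [PySem.List.length_enumerate, List.length_map, PySem.List.length_pyRange_one, hstep]
        omega
      · intro i h1 h2
        rw [PySem.List.getElem_enumerate]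
        have hi : i < xs.length := by simpa [PySem.List.length_enumerate] using h1
        rw [List.getElem_map, PySem.List.getElem_pyRange_one]
        have hmod : PySem.Int.mod (((q * xs.length : Nat) : Int) + (i : Int)) (xs.length : Int) = (i : Int) := by
          rw [PySem.Int.mod_eq_emod_of_pos (by exact_mod_cast hlen)]
          rw [show (((q * xs.length : Nat) : Int) + (i : Int)) = (i : Int) + (xs.length : Int) * (q : Int) by push_cast; ring]
          rw [Int.add_mul_emod_self_left, Int.emod_eq_of_lt (by positivity) (by exact_mod_cast hi)]
        rw [hmod, PySem.List.pyGet?_natCast, List.getElem?_eq_getElem hi]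
        rfl
    · -- the remaining m copies, shifted by one block
      rw [show ((q * xs.length : Nat) : Int) + ((xs.length : Nat) : Int) = (((q + 1) * xs.length : Nat) : Int) by push_cast; ring]
      exact ih (q + 1)

-- the whole per-group computation agrees, for any item list
theorem group_eq (xs : List (String × String)) :
    (PySem.List.enumerate
        ((PySem.List.pyRange 0 N_REPLAY 1).foldl
          (fun acc _ => acc ++ xs) ([] : List (String × String))) 0).foldl
      (fun lines jit =>
        lines ++ [PySem.Int.toStr jit.1 ++ ":\t" ++ jit.2.1 ++ "\t" ++ jit.2.2 ++ "\n"])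
      ([] : List String)
    = (PySem.List.pyRange 0 ((xs.length : Int) * N_REPLAY) 1).map (fun j =>
        let it := (PySem.List.pyGet? xs (PySem.Int.mod j (xs.length : Int))).getD ("", "")
        PySem.Int.toStr j ++ ":\t" ++ it.1 ++ "\t" ++ it.2 ++ "\n") := by
  rw [show N_REPLAY = ((100 : Nat) : Int) by rfl, replayA_eq xs 100 [],
      List.nil_append, PySem.List.foldl_append_singleton_eq_map, List.nil_append]
  by_cases hemp : xs = []
  · subst hemp
    simp [PySem.List.pyRange_one_eq_nil, PySem.List.enumerate_nil]
  · have h := enum_flatten_eq xs hemp ("", "") 100 0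
    simp only [Nat.zero_mul, Nat.zero_add, Nat.cast_zero] at h
    rw [h, List.map_map]
    rw [show ((xs.length : Int) * ((100 : Nat) : Int)) = (((100 * xs.length : Nat) : Int)) by push_cast; ring]
    rfl

-- ===== VERDICT (by name: the statement is the Claim_ definition above) =====
set_option maxRecDepth 8000 in
theorem convert_to_dramsysformat_replay_spec : Claim_equal_convert_to_dramsysformat_replay := by
  intro data_group n_groups _hdom _hpre
  unfold Spec_convert_to_dramsysformat_replay
  unfold convert_to_dramsysformat_replay convert_to_dramsysformat_replay_alt
  apply List.foldl_ext
  intro i _ acc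
  dsimp only
  rw [itemsA_eq, itemsB_eq, group_eq]
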